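-- pv_equiv track=rewrite | github.com/darboledas/criptoclasica | transposition/auto_transpo.py | keyword_to_order_read
-- ===== SOURCE A (Python) =====
-- import sys, math, unicodedata, string, argparse, re
--
-- def normalizar(texto: str) -> str:
--     """Convierte el texto a A–Z: elimina tildes, ñ, signos y pasa a mayúsculas."""
--     t = unicodedata.normalize("NFD", texto)
--     t = ''.join(ch for ch in t if unicodedata.category(ch) != "Mn")
--     t = t.upper()
--     return ''.join(ch for ch in t if ch in string.ascii_uppercase)
--
-- def keyword_to_order_read(keyword: str):
--     w = normalizar(keyword)
--     pares = sorted((ch, i) for i, ch in enumerate(w))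
--     rank = [0]*len(w)
--     r = 1
--     for _, i in pares:
--         rank[i] = r
--         r += 1
--     return [i for _, i in sorted((rank[i], i) for i in range(len(w)))]
-- ===== SOURCE B (Python) =====
-- import unicodedata, string
--
-- def normalizar(texto: str) -> str:
--     """Convierte el texto a A-Z: elimina tildes, n~, signos y pasa a mayusculas."""
--     t = unicodedata.normalize("NFD", texto)
--     t = ''.join(ch for ch in t if unicodedata.category(ch) != "Mn")
--     t = t.upper()
--     return ''.join(ch for ch in t if ch in string.ascii_uppercase)
--
-- def keyword_to_order_read(keyword: str):
--     w = normalizar(keyword)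
--     return [i for _, i in sorted((ch, i) for i, ch in enumerate(w))]
-- ===== Notes on version B (the rewrite author's own statement) =====
-- stated objective: simpler
-- what changed: B extracts the read order directly from the single (char, index) sort, dropping A's rank table and its entire second sort pass.
import Mathlib
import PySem

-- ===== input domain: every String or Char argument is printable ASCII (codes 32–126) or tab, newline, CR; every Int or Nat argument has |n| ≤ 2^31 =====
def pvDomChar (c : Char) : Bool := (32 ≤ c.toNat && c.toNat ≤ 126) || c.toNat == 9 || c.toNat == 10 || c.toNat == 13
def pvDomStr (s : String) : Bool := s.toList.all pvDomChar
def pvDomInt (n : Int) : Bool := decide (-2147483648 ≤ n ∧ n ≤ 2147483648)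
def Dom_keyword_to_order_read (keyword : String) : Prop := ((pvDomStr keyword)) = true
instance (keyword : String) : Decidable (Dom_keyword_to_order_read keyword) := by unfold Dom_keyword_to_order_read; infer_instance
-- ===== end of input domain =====

-- B reads the column order straight off the single (char, index) sort, dropping A's rank table and its second sort (objective: simpler).


-- ===== PORT A =====
-- normalizar (shared helper of A and B): on the ASCII domain NFD is the identity and no
-- character has category Mn, so the Python helper is exactly: uppercase, then keep the
-- characters lying in A–Z ('ch in string.ascii_uppercase' on a single char = membership).
-- Returned as List Char; both ports consume it immediately.
def normalizar (texto : String) : List Char :=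
  (PySem.Chars.upper texto.toList).filter
    (fun ch => "ABCDEFGHIJKLMNOPQRSTUVWXYZ".toList.contains ch)

-- literal port of A: sort the (ch, i) pairs, build the rank table with the counter r,
-- then sort (rank[i], i) over range(len(w)) and project the indices.
-- Indices produced by enumerate are ≥ 0, so `.toNat` is exact here; the final
-- comprehension only indexes rank at i ∈ range(len(w)), so pyGetD's default is never used.
def keyword_to_order_read (keyword : String) : List Int :=
  let w := normalizar keyword
  let pares := PySem.List.sorted2
    ((PySem.List.enumerate w).map (fun p => (p.2, p.1))) Prod.fst Prod.snd
  let st := pares.foldl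
    (fun (st : List Int × Int) p => (st.1.set p.2.toNat st.2, st.2 + 1))
    (List.replicate w.length 0, 1)
  let rank := st.1
  (PySem.List.sorted2
      ((PySem.List.pyRange 0 (w.length : Int) 1).map
        (fun i => (PySem.List.pyGetD rank i 0, i)))
      Prod.fst Prod.snd).map Prod.snd

-- ===== PORT B =====
-- literal port of B: one sort of the (ch, i) pairs, project the indices.
def keyword_to_order_read_alt (keyword : String) : List Int :=
  let w := normalizar keyword
  (PySem.List.sorted2
      ((PySem.List.enumerate w).map (fun p => (p.2, p.1))) Prod.fst Prod.snd).map Prod.snd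

-- ===== PRECONDITION & SPEC =====
def Spec_keyword_to_order_read (keyword : String) (out : List Int) : Prop := out = keyword_to_order_read_alt keyword
instance (keyword : String) (out : List Int) : Decidable (Spec_keyword_to_order_read keyword out) := by unfold Spec_keyword_to_order_read; infer_instance

-- ===== CLAIM (what is proved, stated in full; the proofs are below) =====
def Claim_equal_keyword_to_order_read : Prop := ∀ (keyword : String), Dom_keyword_to_order_read keyword → Spec_keyword_to_order_read keyword (keyword_to_order_read keyword)

-- ===== LEMMAS AND PROOFS =====

-- sorted2 (Python's tuple sort) is sorted with the lexicographic key: the two insertion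
-- predicates agree pointwise on linear orders.
theorem sorted2_eq_sorted_lex {α κ₁ κ₂ : Type} [LinearOrder κ₁] [LinearOrder κ₂]
    (xs : List α) (k1 : α → κ₁) (k2 : α → κ₂) :
    PySem.List.sorted2 xs k1 k2 = PySem.List.sorted xs (fun a => toLex (k1 a, k2 a)) := by
  have hb : (fun a b => decide (k1 a < k1 b) || (!decide (k1 b < k1 a) && decide (k2 a < k2 b)))
      = (fun a b : α => decide (toLex (k1 a, k2 a) < toLex (k1 b, k2 b))) := by
    funext a b
    rcases lt_trichotomy (k1 a) (k1 b) with h | h | h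
    · simp [Prod.Lex.toLex_lt_toLex, h]
    · simp [Prod.Lex.toLex_lt_toLex, h]
    · simp [Prod.Lex.toLex_lt_toLex, h, asymm h, ne_of_gt h]
  unfold PySem.List.sorted2 PySem.List.sorted
  simp only [if_neg (by decide : ¬ (false = true)), hb]

-- positions the rank fold never writes keep their value
theorem rank_fold_preserve (is : List Int) (acc : List Int) (r : Int) (j : Nat)
    (hj : ∀ y ∈ is, y.toNat ≠ j) :
    (is.foldl (fun (st : List Int × Int) x => (st.1.set x.toNat st.2, st.2 + 1)) (acc, r)).1[j]?
      = acc[j]? := by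
  induction is generalizing acc r with
  | nil => rfl
  | cons x t ih =>
    simp only [List.foldl_cons]
    rw [ih _ _ (fun y hy => hj y (List.mem_cons_of_mem _ hy))]
    exact List.getElem?_set_ne (hj x (List.mem_cons_self))

-- the rank table: after the fold, the position written by the k-th element holds r + k
theorem rank_fold_spec (is : List Int) (acc : List Int) (r : Int)
    (hnd : is.Nodup) (hin : ∀ x ∈ is, 0 ≤ x ∧ x.toNat < acc.length) :
    ∀ k (hk : k < is.length),
      (is.foldl (fun (st : List Int × Int) x => (st.1.set x.toNat st.2, st.2 + 1)) (acc, r)).1[(is[k]).toNat]?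
        = some (r + k) := by
  induction is generalizing acc r with
  | nil => intro k hk; simp at hk
  | cons x t ih =>
    have hx0 : 0 ≤ x := (hin x List.mem_cons_self).1
    have hxl : x.toNat < acc.length := (hin x List.mem_cons_self).2
    intro k hk
    cases k with
    | zero =>
      simp only [List.foldl_cons, List.getElem_cons_zero]
      rw [rank_fold_preserve]
      · simp [List.getElem?_set_self hxl]
      · intro y hy hne
        have hy0 : 0 ≤ y := (hin y (List.mem_cons_of_mem _ hy)).1
        have : y = x := by omega
        exact (List.nodup_cons.1 hnd).1 (this ▸ hy)
    | succ k =>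
      simp only [List.foldl_cons, List.getElem_cons_succ]
      have := ih (acc.set x.toNat r) (r + 1) (List.nodup_cons.1 hnd).2
        (fun y hy => by
          have := hin y (List.mem_cons_of_mem _ hy); simpa using this)
        k (by simpa using Nat.lt_of_succ_lt_succ hk)
      rw [this]; congr 1; push_cast; ring

-- A = B: A's second sort of (rank[i], i) is exactly enumerate of E.map snd from 1,
-- whose snd-projection is E.map snd, i.e. B's result.
theorem main_eq (keyword : String) :
    keyword_to_order_read keyword = keyword_to_order_read_alt keyword := by
  unfold keyword_to_order_read keyword_to_order_read_alt
  set w := normalizar keyword with hw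
  set P := (PySem.List.enumerate w).map (fun p : Int × Char => (p.2, p.1)) with hP
  set E := PySem.List.sorted2 P Prod.fst Prod.snd with hE
  set is := E.map Prod.snd with his
  -- is is a permutation of range(len w)
  have hPsnd : P.map Prod.snd = PySem.List.pyRange 0 (w.length : Int) 1 := by
    rw [hP, List.map_map]
    have : (Prod.snd ∘ fun p : Int × Char => (p.2, p.1)) = Prod.fst := rfl
    rw [this, PySem.List.map_fst_enumerate]
    simp
  have hperm : is.Perm (PySem.List.pyRange 0 (w.length : Int) 1) := by
    rw [his, ← hPsnd]
    exact (PySem.List.sorted2_perm P Prod.fst Prod.snd false).map Prod.snd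
  have hnd : is.Nodup := hperm.nodup_iff.mpr (PySem.List.nodup_pyRange_one _ _)
  have hin : ∀ x ∈ is, 0 ≤ x ∧ x.toNat < w.length := by
    intro x hx
    have := PySem.List.mem_pyRange_one.1 (hperm.mem_iff.1 hx)
    omega
  -- the fold over pares is the fold over is
  have hfold : E.foldl
      (fun (st : List Int × Int) p => (st.1.set p.2.toNat st.2, st.2 + 1))
      (List.replicate w.length 0, 1)
      = is.foldl (fun (st : List Int × Int) x => (st.1.set x.toNat st.2, st.2 + 1))
          (List.replicate w.length 0, 1) := by
    rw [his, List.foldl_map]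
  set rank := (is.foldl (fun (st : List Int × Int) x => (st.1.set x.toNat st.2, st.2 + 1))
      (List.replicate w.length 0, 1)).1 with hrankdef
  have hrank : ∀ k (hk : k < is.length), rank[(is[k]).toNat]? = some (1 + (k : Int)) := by
    intro k hk
    rw [hrankdef]
    exact rank_fold_spec is _ 1 hnd (by simpa using hin) k hk
  -- the second sort's input is a rearrangement of enumerate is 1
  have hM : PySem.List.enumerate is 1 = is.map (fun i => (PySem.List.pyGetD rank i 0, i)) := by
    apply List.ext_getElem
    · simp [PySem.List.length_enumerate]
    · intro k h1 h2
      have hk : k < is.length := by simpa [PySem.List.length_enumerate] using h1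
      rw [PySem.List.getElem_enumerate]
      simp only [List.getElem_map]
      have h0 : 0 ≤ is[k] := (hin _ (List.getElem_mem hk)).1
      rw [PySem.List.pyGetD_of_nonneg _ _ h0]
      have := hrank k hk
      simp [List.getD_eq_getElem?_getD, this]
  -- finish: the second sort IS enumerate is 1, whose snd-projection is is
  show (PySem.List.sorted2
      ((PySem.List.pyRange 0 (w.length : Int) 1).map
        (fun i => (PySem.List.pyGetD
          (E.foldl (fun (st : List Int × Int) p => (st.1.set p.2.toNat st.2, st.2 + 1))
            (List.replicate w.length 0, 1)).1 i 0, i)))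
      Prod.fst Prod.snd).map Prod.snd = is
  rw [hfold]
  rw [sorted2_eq_sorted_lex]
  rw [PySem.List.sorted_eq_of_perm_of_pairwise_lt _ (PySem.List.enumerate is 1) _ ?_ ?_]
  · rw [PySem.List.map_snd_enumerate, his]
  · rw [hM]; exact hperm.map _
  · exact (PySem.List.pairwise_lt_enumerate is 1).imp
      (fun h => Prod.Lex.toLex_lt_toLex.mpr (Or.inl h))

-- ===== VERDICT (by name: the statement is the Claim_ definition above) =====
theorem keyword_to_order_read_spec : Claim_equal_keyword_to_order_read := by
  intro keyword _
  unfold Spec_keyword_to_order_read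
  exact main_eq keyword
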